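-- pv_equiv track=rewrite | github.com/mpettersson/PythonReview | questions/list_and_recursion/power_set_from_multiset.py | power_set_from_multiset_itertools_combinations
-- ===== SOURCE A (Python) =====
-- import itertools
--
-- def power_set_from_multiset_itertools_combinations(iterable):
--     if iterable is not None and hasattr(iterable, '__iter__'):
--         result = set()
--         l = sorted(iterable)
--         for r in range(len(l) + 1):
--             for e in itertools.combinations(l, r):
--                 result.add(tuple(e))
--         return result
-- ===== SOURCE B (Python) =====
-- def power_set_from_multiset_itertools_combinations(iterable):
--     if iterable is not None and hasattr(iterable, '__iter__'):
--         l = tuple(sorted(iterable))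
--         memo = {}
--
--         def gen(xs, r):
--             # distinct size-r sub-multisets of the sorted tuple xs, in lexicographic order
--             if r == 0:
--                 return [()]
--             if not xs:
--                 return []
--             key = (len(xs), r)   # xs is always a suffix of l, so len(xs) identifies it
--             hit = memo.get(key)
--             if hit is not None:
--                 return hit
--             v = xs[0]
--             run = 1
--             while run < len(xs) and xs[run] == v:
--                 run += 1
--             rest = xs[run:]
--             out = []
--             for k in range(min(run, r), -1, -1):
--                 pre = (v,) * k
--                 for t in gen(rest, r - k):
--                     out.append(pre + t)
--             memo[key] = out
--             return out
--
--         result = set()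
--         for r in range(len(l) + 1):
--             result.update(gen(l, r))
--         return result
-- ===== Notes on version B (the rewrite author's own statement) =====
-- stated objective: alternative
-- what changed: Instead of enumerating all n-choose-r index combinations for every r and deduplicating them through a set, B run-length-groups the sorted input and recursively (with memoization over suffixes) chooses how many copies of each distinct value to take, emitting every distinct sub-multiset exactly once.
import Mathlib
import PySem

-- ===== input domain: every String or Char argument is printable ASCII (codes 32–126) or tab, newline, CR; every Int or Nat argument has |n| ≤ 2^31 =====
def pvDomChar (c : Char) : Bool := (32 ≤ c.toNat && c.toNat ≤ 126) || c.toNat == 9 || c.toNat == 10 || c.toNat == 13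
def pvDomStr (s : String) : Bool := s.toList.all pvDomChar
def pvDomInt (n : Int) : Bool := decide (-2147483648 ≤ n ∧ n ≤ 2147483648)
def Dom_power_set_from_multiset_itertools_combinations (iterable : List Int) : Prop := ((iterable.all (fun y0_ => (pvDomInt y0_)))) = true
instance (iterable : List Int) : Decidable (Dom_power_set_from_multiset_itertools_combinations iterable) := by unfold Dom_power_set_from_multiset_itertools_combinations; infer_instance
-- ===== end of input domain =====

-- B replaces A's "enumerate every index combination of every size and deduplicate through a set"
-- with a run-length recursion over the sorted input that emits each distinct sub-multiset once.
-- Both Pythons return a set; both ports return its elements in first-insertion order.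

-- ===== PORT A =====
def power_set_from_multiset_itertools_combinations (iterable : List Int) : List (List Int) :=
  let l := PySem.List.sorted iterable (fun x => x) false
  (PySem.List.pyRange 0 (l.length + 1) 1).foldl
    (fun result r =>
      (PySem.List.combinations l r.toNat).foldl (fun result e => PySem.Set.add result e) result)
    PySem.Set.empty

-- ===== PORT B =====
-- helper of Source B: gen(xs, r) = the distinct size-r sub-multisets of the sorted list xs, in
-- lexicographic order; Source B additionally caches results per (len(xs), r) — a value-transparent
-- memo of this same recursion, so the port is the recursion itself
def pvAltGen (xs : List Int) (r : Nat) : List (List Int) :=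
  if r = 0 then [[]]
  else
    match xs with
    | [] => []
    | v :: tl =>
      let run := ((v :: tl).takeWhile (fun y => y == v)).length
      let rest := (v :: tl).drop run
      ((List.range (min run r + 1)).reverse).foldl
        (fun out k => out ++ (pvAltGen rest (r - k)).map (fun t => List.replicate k v ++ t)) []
termination_by xs.length
decreasing_by
  simp only [List.length_drop, List.takeWhile_cons]
  simp only [BEq.rfl, if_pos, List.length_cons]
  omega

def power_set_from_multiset_itertools_combinations_alt (iterable : List Int) : List (List Int) :=
  let l := PySem.List.sorted iterable (fun x => x) false
  (PySem.List.pyRange 0 (l.length + 1) 1).foldl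
    (fun result r => PySem.Set.update result (pvAltGen l r.toNat)) PySem.Set.empty

-- ===== PRECONDITION & SPEC =====
def Spec_power_set_from_multiset_itertools_combinations (iterable : List Int) (out : List (List Int)) : Prop := out = power_set_from_multiset_itertools_combinations_alt iterable
instance (iterable : List Int) (out : List (List Int)) : Decidable (Spec_power_set_from_multiset_itertools_combinations iterable out) := by unfold Spec_power_set_from_multiset_itertools_combinations; infer_instance

-- ===== CLAIM (what is proved, stated in full; the proofs are below) =====
def Claim_equal_power_set_from_multiset_itertools_combinations : Prop := ∀ (iterable : List Int), Dom_power_set_from_multiset_itertools_combinations iterable → Spec_power_set_from_multiset_itertools_combinations iterable (power_set_from_multiset_itertools_combinations iterable)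

-- ===== LEMMAS AND PROOFS =====

lemma pvAltGen_zero (xs : List Int) : pvAltGen xs 0 = [[]] := by
  unfold pvAltGen; simp

lemma pvAltGen_nil (r : Nat) (h : r ≠ 0) : pvAltGen [] r = [] := by
  unfold pvAltGen; simp [h]

-- the per-run flatMap shape of pvAltGen on a nonempty list (valid for every r)
lemma pvAltGen_formula (v : Int) (tl : List Int) (r : Nat) :
    pvAltGen (v :: tl) r =
      ((List.range (min ((v :: tl).takeWhile (fun y => y == v)).length r + 1)).reverse).flatMap
        (fun k => (pvAltGen ((v :: tl).drop ((v :: tl).takeWhile (fun y => y == v)).length) (r - k)).map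
          (fun t => List.replicate k v ++ t)) := by
  rcases Nat.eq_zero_or_pos r with hr | hr
  · subst hr
    simp [pvAltGen_zero]
  · conv_lhs => unfold pvAltGen
    simp only [Nat.pos_iff_ne_zero.mp hr, if_false]
    rw [PySem.List.foldl_append_eq_flatMap]
    simp

-- every member of a generated sub-multiset comes from xs
lemma pv_mem_of_mem_altGen (xs : List Int) (r : Nat) (t : List Int) (ht : t ∈ pvAltGen xs r)
    (y : Int) (hy : y ∈ t) : y ∈ xs := by
  induction hn : xs.length using Nat.strong_induction_on generalizing xs r t with
  | _ n ih =>
  subst hn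
  match xs with
  | [] =>
    rcases Nat.eq_zero_or_pos r with hr | hr
    · subst hr; simp [pvAltGen_zero] at ht; subst ht; simp at hy
    · rw [pvAltGen_nil _ (Nat.pos_iff_ne_zero.mp hr)] at ht; simp at ht
  | v :: tl =>
    rw [pvAltGen_formula] at ht
    simp only [List.mem_flatMap, List.mem_map] at ht
    obtain ⟨k, hk, t', ht', rfl⟩ := ht
    rcases List.mem_append.mp hy with h | h
    · have := List.eq_of_mem_replicate h
      subst this; exact List.mem_cons_self
    · have hlt : ((v :: tl).drop ((v :: tl).takeWhile (fun y => y == v)).length).length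
          < (v :: tl).length := by
        simp
      exact List.mem_of_mem_drop (ih _ hlt _ _ _ ht' h rfl)

-- on a list of elements ≥ v, sorted, v does not survive dropWhile(== v)
lemma pv_not_mem_dropWhile (v : Int) (l : List Int) (h1 : ∀ x ∈ l, v ≤ x)
    (h2 : l.Pairwise (· ≤ ·)) : v ∉ l.dropWhile (fun y => y == v) := by
  induction l with
  | nil => simp
  | cons a tl ih =>
    by_cases ha : a = v
    · subst ha
      rw [List.dropWhile_cons_of_pos (by simp)]
      exact ih (fun x hx => h1 x (List.mem_cons_of_mem _ hx)) h2.tail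
    · rw [List.dropWhile_cons_of_neg (by simp [ha])]
      intro hv
      rcases List.mem_cons.mp hv with h | h
      · exact ha h.symm
      · have hva : v ≤ a := h1 a List.mem_cons_self
        have hav : a ≤ v := (List.pairwise_cons.mp h2).1 v h
        exact ha (le_antisymm hav hva)

-- ofList commutes with prepending a fixed head (an injective map)
lemma pv_ofList_map_cons (v : Int) (C : List (List Int)) :
    PySem.Set.ofList (C.map (v :: ·)) = (PySem.Set.ofList C).map (v :: ·) := by
  induction C using List.reverseRecOn with
  | nil => simp
  | append_singleton C a ih =>
    rw [List.map_append, List.map_singleton, PySem.Set.ofList_append_singleton,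
      PySem.Set.ofList_append_singleton, ih]
    rw [PySem.Set.add_eq_ite, PySem.Set.add_eq_ite]
    by_cases hmem : a ∈ PySem.Set.ofList C
    · rw [if_pos hmem, if_pos (List.mem_map_of_mem hmem)]
    · rw [if_neg hmem, if_neg (by
        intro hc
        rcases List.mem_map.mp hc with ⟨b, hb, he⟩
        exact hmem ((List.cons_injective.eq_iff.mp he ▸ hb))), List.map_append, List.map_singleton]

lemma pv_drop_takeWhile (v : Int) (tl : List Int) :
    tl.drop (tl.takeWhile (fun y => y == v)).length = tl.dropWhile (fun y => y == v) := by
  induction tl with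
  | nil => simp
  | cons a t ih => by_cases hc : a == v <;> simp [hc, ih]

lemma pv_range_rev (n : Nat) :
    (List.range (n + 1)).reverse = ((List.range n).reverse.map (· + 1)) ++ [0] := by
  rw [List.range_succ_eq_map]; simp

-- cons-recurrence of pvAltGen on a sorted list, phrased with the A-side dedup filter
lemma pvAltGen_rec (v : Int) (tl : List Int) (r : Nat) (h : (v :: tl).Pairwise (· ≤ ·)) :
    pvAltGen (v :: tl) (r + 1) =
      (pvAltGen tl r).map (v :: ·) ++
        (pvAltGen tl (r + 1)).filter
          (fun t => !(PySem.Set.contains ((pvAltGen tl r).map (v :: ·)) t)) := by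
  have hvle : ∀ x ∈ tl, v ≤ x := (List.pairwise_cons.mp h).1
  have htlp : tl.Pairwise (· ≤ ·) := (List.pairwise_cons.mp h).2
  have hnd : v ∉ tl.dropWhile (fun y => y == v) := pv_not_mem_dropWhile v tl hvle htlp
  by_cases hA : tl.takeWhile (fun y => y == v) = []
  · -- the run of v's has length 1: tl does not start with v, hence v ∉ tl
    have hvtl : v ∉ tl := by
      have he : tl.dropWhile (fun y => y == v) = tl := by
        cases tl with
        | nil => simp
        | cons a t =>
          have hav : ¬(a == v) = true := by
            intro hav; simp [hav] at hA
          simp [hav]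
      rwa [he] at hnd
    rw [pvAltGen_formula]
    have hlen : ((v :: tl).takeWhile (fun y => y == v)).length = 1 := by
      simp [hA]
    rw [hlen]
    have hmin : min 1 (r + 1) = 1 := by omega
    rw [hmin]
    have hrange : (List.range (1 + 1)).reverse = [1, 0] := by decide
    rw [hrange]
    simp only [List.flatMap_cons, List.flatMap_nil, List.drop_succ_cons, List.drop_zero,
      List.append_nil, Nat.add_sub_cancel, Nat.sub_zero]
    have h1 : (pvAltGen tl r).map (fun t => List.replicate 1 v ++ t)
        = (pvAltGen tl r).map (v :: ·) := by simp
    have h2 : (pvAltGen tl (r + 1)).map (fun t => List.replicate 0 v ++ t)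
        = pvAltGen tl (r + 1) := by simp
    rw [h1, h2]
    congr 1
    symm
    rw [List.filter_eq_self]
    intro t ht
    simp only [Bool.not_eq_true', PySem.Set.contains_eq_listContains, List.contains_eq_mem,
      decide_eq_false_iff_not, List.mem_map]
    rintro ⟨b, hb, rfl⟩
    exact hvtl (pv_mem_of_mem_altGen tl (r + 1) _ ht v List.mem_cons_self)
  · -- tl itself starts with v: its run merges into the run of v :: tl
    obtain ⟨w, tl', rfl⟩ : ∃ w tl', tl = w :: tl' := by
      cases tl with
      | nil => simp at hA
      | cons a t => exact ⟨a, t, rfl⟩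
    have hwv : w = v := by
      by_contra hne
      exact hA (List.takeWhile_cons_of_neg (by simp [hne]))
    subst hwv
    have hc1pos : 1 ≤ ((w :: tl').takeWhile (fun y => y == w)).length := by
      simp
    set c1 : Nat := ((w :: tl').takeWhile (fun y => y == w)).length with hc1
    set R : List Int := (w :: tl').drop c1 with hR
    have hvR : w ∉ R := by
      rw [hR, hc1, pv_drop_takeWhile]; exact hnd
    have hmemR : ∀ (m : Nat) (t : List Int), t ∈ pvAltGen R m → w ∉ t := by
      intro m t ht hw
      exact hvR (pv_mem_of_mem_altGen R m t ht w hw)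
    -- the three flatMap formulas
    have hlenc : ((w :: w :: tl').takeWhile (fun y => y == w)).length = c1 + 1 := by
      rw [List.takeWhile_cons_of_pos (by simp)]
      simp [hc1]
    have hL := pvAltGen_formula w (w :: tl') (r + 1)
    rw [hlenc, List.drop_succ_cons, ← hR] at hL
    have hminL : min (c1 + 1) (r + 1) = min c1 r + 1 := by omega
    rw [hminL] at hL
    have hr0 := pvAltGen_formula w tl' r
    rw [← hc1, ← hR] at hr0
    have hr1 := pvAltGen_formula w tl' (r + 1)
    rw [← hc1, ← hR] at hr1
    rw [hL, hr0, hr1]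
    rw [pv_range_rev (min c1 r + 1), List.flatMap_append, List.flatMap_map]
    congr 1
    · -- the k ≥ 1 chunks are the (v ::)-prefixed copies of pvAltGen tl r
      rw [List.map_flatMap]
      apply List.flatMap_congr
      intro j _
      rw [List.map_map]
      have hs : r + 1 - (j + 1) = r - j := by omega
      rw [hs]
      rfl
    · -- the k = 0 chunk survives the dedup filter, the k ≥ 1 chunks are filtered away
      rw [List.filter_flatMap]
      have hcongr : ∀ k ∈ (List.range (min c1 (r + 1) + 1)).reverse,
          ((pvAltGen R (r + 1 - k)).map (fun t => List.replicate k w ++ t)).filter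
              (fun t => !(PySem.Set.contains
                (((List.range (min c1 r + 1)).reverse.flatMap
                  (fun k => (pvAltGen R (r - k)).map (fun t => List.replicate k w ++ t))).map
                    (w :: ·)) t))
            = if k = 0 then pvAltGen R (r + 1) else [] := by
        intro k hk
        have hkle : k ≤ min c1 (r + 1) := by
          have := List.mem_range.mp (List.mem_reverse.mp hk); omega
        cases k with
        | zero =>
          rw [if_pos rfl]
          simp only [List.replicate_zero, List.nil_append, List.map_id', Nat.sub_zero]
          rw [List.filter_eq_self]
          intro t ht
          simp only [Bool.not_eq_true', PySem.Set.contains_eq_listContains, List.contains_eq_mem,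
            decide_eq_false_iff_not, List.mem_map]
          rintro ⟨b, hb, rfl⟩
          exact hmemR _ _ ht List.mem_cons_self
        | succ j =>
          rw [if_neg (Nat.succ_ne_zero j)]
          apply List.filter_eq_nil_iff.mpr
          intro x hx
          rcases List.mem_map.mp hx with ⟨t, ht, rfl⟩
          simp only [Bool.not_eq_true, Bool.not_eq_false', PySem.Set.contains_eq_listContains,
            List.contains_eq_mem, decide_eq_true_eq, List.mem_map]
          refine ⟨List.replicate j w ++ t, ?_, by simp [List.replicate_succ]⟩
          apply List.mem_flatMap.mpr
          refine ⟨j, ?_, ?_⟩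
          · apply List.mem_reverse.mpr
            apply List.mem_range.mpr
            omega
          · have hs : r + 1 - (j + 1) = r - j := by omega
            exact List.mem_map_of_mem (hs ▸ ht)
      rw [List.flatMap_congr hcongr]
      rw [pv_range_rev (min c1 (r + 1)), List.flatMap_append, List.flatMap_map]
      simp

-- MAIN: deduplicating all size-r combinations of a sorted list gives exactly pvAltGen
lemma pv_ofList_combinations (l : List Int) (r : Nat) (h : l.Pairwise (· ≤ ·)) :
    PySem.Set.ofList (PySem.List.combinations l r) = pvAltGen l r := by
  induction l generalizing r with
  | nil =>
    cases r with
    | zero => rw [PySem.List.combinations_zero, pvAltGen_zero]; rfl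
    | succ r => rw [PySem.List.combinations_nil_succ, pvAltGen_nil _ (Nat.succ_ne_zero r)]; rfl
  | cons v tl ih =>
    cases r with
    | zero => rw [PySem.List.combinations_zero, pvAltGen_zero]; rfl
    | succ r =>
      have htlp : tl.Pairwise (· ≤ ·) := (List.pairwise_cons.mp h).2
      rw [PySem.List.combinations_cons_succ, PySem.Set.ofList_append,
        PySem.Set.update_eq_append_filter, pv_ofList_map_cons, ih r htlp, ih (r + 1) htlp,
        pvAltGen_rec v tl r h]

-- ===== VERDICT (by name: the statement is the Claim_ definition above) =====
theorem power_set_from_multiset_itertools_combinations_spec : Claim_equal_power_set_from_multiset_itertools_combinations := by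
  intro iterable _
  unfold Spec_power_set_from_multiset_itertools_combinations
  unfold power_set_from_multiset_itertools_combinations
    power_set_from_multiset_itertools_combinations_alt
  have hs : (PySem.List.sorted iterable (fun x => x) false).Pairwise (· ≤ ·) :=
    PySem.List.sorted_pairwise iterable (fun x => x)
  apply PySem.List.foldl_congr_mem
  intro acc x _
  have hup : (PySem.List.combinations (PySem.List.sorted iterable (fun x => x) false) x.toNat).foldl
      (fun result e => PySem.Set.add result e) acc
      = PySem.Set.update acc
          (PySem.List.combinations (PySem.List.sorted iterable (fun x => x) false) x.toNat) := rfl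
  rw [hup, PySem.Set.update_eq_append_filter, PySem.Set.update_eq_append_filter]
  have hnd : (pvAltGen (PySem.List.sorted iterable (fun x => x) false) x.toNat).Nodup := by
    rw [← pv_ofList_combinations _ _ hs]
    exact PySem.Set.nodup_ofList _
  rw [pv_ofList_combinations _ _ hs]
  rw [PySem.Set.ofList_eq_self_of_nodup _ hnd]
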